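-- pv_equiv track=rewrite | github.com/mgm8/pyngham | pyngham/pyngham.py | _tag_check
-- ===== SOURCE A (Python) =====
-- _PYNGHAM_SIZE_TAG_MAX_ERROR     = 6
--
-- def _tag_check(x, y):
--     """
--     Verifies if a size tag is valid or not.
--
--     :param x: Tag reference to compare.
--     :type x: int
--
--     :param y: Tag sequence to verify.
--     :type y: int
--
--     :return: True/False if the tag comparison passed or not.
--     :rtype: bool
--     """
--     j = int()
--     distance = int()
--     diff = x ^ y
--
--     # Early check to save time
--     if not diff:
--         return True
--
--     distance = 0
--     for j in range(24):
--         if diff & 0x01: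
--             distance = distance + 1
--             if distance > _PYNGHAM_SIZE_TAG_MAX_ERROR:
--                 return False
--         diff = diff >> 1
--
--     return True
-- ===== SOURCE B (Python) =====
-- _PYNGHAM_SIZE_TAG_MAX_ERROR = 6
--
-- def _tag_check(x, y):
--     return bin((x ^ y) & 0xFFFFFF).count('1') <= _PYNGHAM_SIZE_TAG_MAX_ERROR
-- ===== Notes on version B (the rewrite author's own statement) =====
-- stated objective: idiomatic
-- what changed: Replaces the 24-iteration shift/test loop with early exit by a single masked XOR whose set bits are counted via the binary string representation (bin(...).count('1')) and compared to 6.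
import Mathlib
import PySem

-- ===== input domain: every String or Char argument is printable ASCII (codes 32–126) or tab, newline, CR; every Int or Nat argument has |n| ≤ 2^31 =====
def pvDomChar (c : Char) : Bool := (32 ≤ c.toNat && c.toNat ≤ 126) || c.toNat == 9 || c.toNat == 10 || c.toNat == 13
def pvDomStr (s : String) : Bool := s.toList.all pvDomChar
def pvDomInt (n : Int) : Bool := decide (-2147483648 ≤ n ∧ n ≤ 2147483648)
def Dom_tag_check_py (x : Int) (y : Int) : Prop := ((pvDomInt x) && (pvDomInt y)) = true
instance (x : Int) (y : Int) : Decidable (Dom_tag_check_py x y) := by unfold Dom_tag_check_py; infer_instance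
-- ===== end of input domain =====

-- B replaces A's 24-step shift/test loop (running distance, early exit) by one masked XOR whose
-- set bits are counted through the binary string representation, for a plainer one-liner.

-- ===== PORT A =====
-- the 'for j in range(24)' loop: test the low bit, bump distance (early False past 6), shift right
def tagLoopA : Nat → Int → Int → Bool
  | 0, _, _ => true
  | n+1, diff, distance =>
    if PySem.Int.band diff 1 ≠ 0 then        -- Python truthiness of 'diff & 0x01'
      if distance + 1 > 6 then false          -- distance = distance + 1; if distance > 6: return False
      else tagLoopA n (diff >>> (1:Nat)) (distance + 1)
    else tagLoopA n (diff >>> (1:Nat)) distance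

def tag_check_py (x : Int) (y : Int) : Bool :=
  let diff := PySem.Int.bxor x y
  if diff = 0 then true                       -- 'if not diff: return True'
  else tagLoopA 24 diff 0

-- ===== PORT B =====
-- bin((x ^ y) & 0xFFFFFF).count('1') <= 6
def tag_check_py_alt (x : Int) (y : Int) : Bool :=
  decide (PySem.Str.count (PySem.Int.pyBin (PySem.Int.band (PySem.Int.bxor x y) 0xFFFFFF)) "1" ≤ 6)

-- ===== PRECONDITION & SPEC =====
def Spec_tag_check_py (x : Int) (y : Int) (out : Bool) : Prop := out = tag_check_py_alt x y
instance (x : Int) (y : Int) (out : Bool) : Decidable (Spec_tag_check_py x y out) := by unfold Spec_tag_check_py; infer_instance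

-- ===== CLAIM (what is proved, stated in full; the proofs are below) =====
def Claim_equal_tag_check_py : Prop := ∀ (x : Int) (y : Int), Dom_tag_check_py x y → Spec_tag_check_py x y (tag_check_py x y)

-- ===== LEMMAS AND PROOFS =====

/-- number of 1-bits of a natural number -/
def ones (n : Nat) : Nat :=
  if n = 0 then 0 else n % 2 + ones (n / 2)
termination_by n
decreasing_by exact Nat.div_lt_self (by omega) (by omega)

theorem ones_unfold (n : Nat) : ones n = n % 2 + ones (n / 2) := by
  by_cases h : n = 0
  · subst h; rw [ones]; simp
  · rw [ones, if_neg h]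

theorem ones_zero : ones 0 = 0 := by rw [ones]; simp

theorem ones_one : ones 1 = 1 := by
  rw [ones_unfold]
  norm_num [ones_zero]

theorem isPrefixOf_one (h : Char) (t : List Char) :
    List.isPrefixOf ['1'] (h :: t) = ('1' == h) := by
  simp only [List.isPrefixOf, Bool.and_true]

/-- the count of low set bits A's loop accumulates -/
def popLow : Nat → Int → Nat
  | 0, _ => 0
  | n+1, d => (if PySem.Int.band d 1 ≠ 0 then 1 else 0) + popLow n (d >>> (1:Nat))

theorem band_one_emod (d : Int) : PySem.Int.band d 1 = d % 2 := by
  rw [PySem.Int.band_one]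
  simp [PySem.Int.mod, Int.fmod_eq_emod]

theorem shiftRight_one_ediv (d : Int) : d >>> (1:Nat) = d / 2 := by
  have := Int.shiftRight_eq_div_pow d 1
  simpa using this

theorem emod_pow_emod_two (d : Int) (n : Nat) : d % ((2:Int)^(n+1)) % 2 = d % 2 :=
  Int.emod_emod_of_dvd _ ⟨2^n, by ring⟩

theorem emod_pow_div_two (d : Int) (n : Nat) :
    d % ((2:Int)^(n+1)) / 2 = d / 2 % ((2:Int)^n) := by
  have hM : (0:Int) < 2^n := by positivity
  have hq : 2 * (d / 2) + d % 2 = d := Int.ediv_add_emod d 2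
  have hr0 : 0 ≤ d % 2 := Int.emod_nonneg d (by norm_num)
  have hr2 : d % 2 < 2 := Int.emod_lt_of_pos d (by norm_num)
  have ht0 : 0 ≤ d / 2 % 2^n := Int.emod_nonneg _ (by positivity)
  have htM : d / 2 % 2^n < 2^n := Int.emod_lt_of_pos _ hM
  have key : d % ((2:Int)^(n+1)) = 2 * (d / 2 % 2^n) + d % 2 := by
    conv_lhs => rw [← hq]
    rw [pow_succ, mul_comm ((2:Int)^n) 2]
    rw [Int.add_emod, Int.mul_emod_mul_of_pos _ _ (by norm_num : (0:Int) < 2),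
      Int.emod_eq_of_lt hr0 (by omega), Int.emod_eq_of_lt (by omega) (by omega)]
  rw [key]; omega

theorem popLow_eq_ones (n : Nat) : ∀ d : Int, popLow n d = ones ((d % ((2:Int)^n)).toNat) := by
  induction n with
  | zero => intro d; simp [popLow, ones_zero]
  | succ n ih =>
    intro d
    have hm0 : 0 ≤ d % ((2:Int)^(n+1)) := Int.emod_nonneg d (by positivity)
    have h1 : (d % ((2:Int)^(n+1))).toNat % 2 = (d % 2).toNat := by
      have := emod_pow_emod_two d n
      omega
    have h2 : (d % ((2:Int)^(n+1))).toNat / 2 = (d / 2 % ((2:Int)^n)).toNat := by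
      have := emod_pow_div_two d n
      have h20 : 0 ≤ d / 2 % ((2:Int)^n) := Int.emod_nonneg _ (by positivity)
      omega
    rw [ones_unfold, h1, h2]
    show popLow (n+1) d = _
    rw [popLow, shiftRight_one_ediv, band_one_emod, ih (d / 2)]
    have hd2 : d % 2 = 0 ∨ d % 2 = 1 := by omega
    rcases hd2 with h | h <;> simp [h]

theorem tagLoopA_eq (n : Nat) :
    ∀ (d : Int) (dist : Int), dist ≤ 6 →
      tagLoopA n d dist = decide (dist + (popLow n d : Int) ≤ 6) := by
  induction n with
  | zero =>
    intro d dist hle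
    simp [tagLoopA, popLow, decide_eq_true_eq]
    omega
  | succ n ih =>
    intro d dist hle
    rw [tagLoopA, popLow]
    by_cases hb : PySem.Int.band d 1 ≠ 0
    · rw [if_pos hb, if_pos hb]
      by_cases h7 : dist + 1 > 6
      · rw [if_pos h7]
        symm
        rw [decide_eq_false_iff_not]
        push_cast; omega
      · rw [if_neg h7, ih (d >>> (1:Nat)) (dist + 1) (by omega)]
        rw [decide_eq_decide]
        push_cast; omega
    · rw [if_neg hb, if_neg hb, ih (d >>> (1:Nat)) dist hle]
      rw [decide_eq_decide]
      push_cast; omega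

theorem band_mask (d : Int) : PySem.Int.band d 16777215 = d % 16777216 := by
  have e1 : ((16777215:Int)).toNat = 16777215 := rfl
  have e2 : ∀ k : Nat, k &&& 16777215 = k % 16777216 := by
    intro k
    have h := Nat.and_two_pow_sub_one_eq_mod k 24
    norm_num at h
    exact h
  unfold PySem.Int.band
  by_cases hd : (0:Int) ≤ d
  · rw [if_pos hd, if_pos (by norm_num : (0:Int) ≤ 16777215), e1, e2]
    omega
  · rw [if_neg hd, if_pos (by norm_num : (0:Int) ≤ 16777215), e1, Nat.and_comm, e2]
    omega

theorem countgo_one : ∀ (l : List Char) (fuel acc : Nat), l.length ≤ fuel →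
    PySem.Chars.count.go ['1'] fuel l acc = acc + l.count '1' := by
  intro l
  induction l with
  | nil =>
    intro fuel acc _
    cases fuel <;> simp [PySem.Chars.count.go]
  | cons h t ih =>
    intro fuel acc hle
    cases fuel with
    | zero => simp at hle
    | succ f =>
      rw [PySem.Chars.count.go]
      by_cases hh : h = '1'
      · subst hh
        rw [if_pos (by rw [isPrefixOf_one]; rfl)]
        simp only [List.length_singleton, List.drop_succ_cons, List.drop_zero]
        rw [ih f (acc + 1) (by simpa using hle)]
        simp [List.count_cons]
        omega
      · rw [if_neg (by rw [isPrefixOf_one]; simp only [beq_iff_eq]; exact fun h' => hh h'.symm)]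
        rw [ih f acc (by simpa using hle)]
        simp [List.count_cons, hh]

theorem count_one_chars (cs : List Char) : PySem.Chars.count cs ['1'] = cs.count '1' := by
  unfold PySem.Chars.count
  rw [if_neg (by simp)]
  rw [countgo_one cs cs.length 0 le_rfl]
  omega

theorem count_toDigitsCore : ∀ (fuel k : Nat) (ds : List Char), k < fuel →
    (Nat.toDigitsCore 2 fuel k ds).count '1' = ones k + ds.count '1' := by
  intro fuel
  induction fuel with
  | zero => intro k ds h; omega
  | succ f ih =>
    intro k ds hk
    rw [Nat.toDigitsCore]
    by_cases h0 : k / 2 = 0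
    · rw [if_pos h0]
      have hk2 : k = 0 ∨ k = 1 := by omega
      rcases hk2 with h | h <;> subst h <;>
        simp [Nat.digitChar, ones_zero, ones_one] <;> omega
    · rw [if_neg h0]
      rw [ih (k / 2) _ (by omega)]
      rw [ones_unfold k]
      have hpar : k % 2 = 0 ∨ k % 2 = 1 := by omega
      rcases hpar with h | h <;>
        simp [h, Nat.digitChar, List.count_cons] <;> omega

theorem count_toDigits (k : Nat) : (Nat.toDigits 2 k).count '1' = ones k := by
  unfold Nat.toDigits
  rw [count_toDigitsCore (k+1) k [] (by omega)]
  simp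

theorem A_eq (x y : Int) :
    tag_check_py x y = decide (ones ((PySem.Int.bxor x y % 16777216).toNat) ≤ 6) := by
  unfold tag_check_py
  set diff := PySem.Int.bxor x y with hdiff
  have hpl : popLow 24 diff = ones ((diff % 16777216).toNat) := by
    have := popLow_eq_ones 24 diff
    norm_num at this
    exact this
  by_cases h0 : diff = 0
  · rw [if_pos h0, h0]
    norm_num [ones_zero]
  · rw [if_neg h0, tagLoopA_eq 24 diff 0 (by norm_num), hpl]
    rw [decide_eq_decide]
    omega

theorem B_eq (x y : Int) :
    tag_check_py_alt x y = decide (ones ((PySem.Int.bxor x y % 16777216).toNat) ≤ 6) := by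
  unfold tag_check_py_alt
  set diff := PySem.Int.bxor x y with hdiff
  have hmask : PySem.Int.band diff 0xFFFFFF = diff % 16777216 := band_mask diff
  rw [hmask]
  have hm0 : 0 ≤ diff % 16777216 := Int.emod_nonneg diff (by norm_num)
  rw [decide_eq_decide]
  rw [PySem.Str.count_eq, PySem.Int.toList_pyBin]
  have hts : ("1" : String).toList = ['1'] := rfl
  rw [hts]
  unfold PySem.Int.toBinChars0b
  rw [if_neg (by omega)]
  rw [count_one_chars]
  simp only [List.count_cons]
  rw [if_neg (show ¬('b' == '1') = true by decide), if_neg (show ¬('0' == '1') = true by decide)]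
  simp [count_toDigits]

-- ===== VERDICT (by name: the statement is the Claim_ definition above) =====
theorem tag_check_py_spec : Claim_equal_tag_check_py := by
  intro x y _
  unfold Spec_tag_check_py
  rw [A_eq, B_eq]
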